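-- pv_equiv track=rewrite | github.com/Avasilcai-Andrei/UBB-CS | First year/Fundamentals of programming (Python)/a1-Avasilcai-Andrei-Cristian/p1.py | detminnumber
-- ===== SOURCE A (Python) =====
-- def determinezeros(n: int) -> int:
--     zeros = int(0)
--     while n > 0:
--         if n % 10 == 0:
--             zeros = zeros + 1
--         n = int(n / 10)
--     return zeros
--
-- def detminnumber(n: int) -> int:
--     l = []
--     cn = n
--     while n > 0:
--         if n % 10 != 0:
--             l.append(n % 10)
--         n = int(n / 10)
--     l.sort()
--     m = l[0]
--     l.pop(0)
--     zeros = determinezeros(cn)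
--     while zeros > 0:
--         m = m * 10
--         zeros = zeros - 1
--     length = len(l)
--     for i in range(length):
--         m = m * 10 + l[i]
--     return m
-- ===== SOURCE B (Python) =====
-- def detminnumber(n: int) -> int:
--     # digit-frequency table instead of collect-sort: count every digit once,
--     # then emit smallest nonzero digit, the zeros, then remaining digits ascending
--     count = {}
--     while n > 0:
--         d = n % 10
--         count[d] = count.get(d, 0) + 1
--         n = int(n / 10)
--     lead = min(d for d in range(1, 10) if count.get(d, 0) > 0)
--     m = lead
--     for _ in range(count.get(0, 0)):
--         m = m * 10
--     count[lead] = count.get(lead, 0) - 1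
--     for d in range(1, 10):
--         for _ in range(count.get(d, 0)):
--             m = m * 10 + d
--     return m
-- ===== Notes on version B (the rewrite author's own statement) =====
-- stated objective: alternative
-- what changed: B replaces A's collect-nonzero-digits-then-list.sort()-then-index/pop pipeline with a single digit-frequency table: it counts every digit once, takes the smallest nonzero digit as leader, appends the zeros, then emits the remaining digits in increasing order straight from the table with no sort and no list.
-- outside the precondition, e.g. on detminnumber(0): A raises IndexError, B raises ValueError
import Mathlib
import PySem

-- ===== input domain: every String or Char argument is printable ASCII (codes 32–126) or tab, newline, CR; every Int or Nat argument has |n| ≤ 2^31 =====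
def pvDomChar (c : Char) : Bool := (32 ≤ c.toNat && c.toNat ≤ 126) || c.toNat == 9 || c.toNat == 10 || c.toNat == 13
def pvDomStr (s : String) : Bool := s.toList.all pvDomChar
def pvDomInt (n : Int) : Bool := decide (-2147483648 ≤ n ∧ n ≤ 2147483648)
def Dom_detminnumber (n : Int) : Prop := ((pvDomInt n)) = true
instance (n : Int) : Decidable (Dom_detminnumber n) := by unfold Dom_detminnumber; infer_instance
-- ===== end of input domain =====

-- B re-implements detminnumber with a digit-frequency table instead of collect/sort/pop;
-- equal return value on all n with Pre_ (n > 0); both raise on n ≤ 0.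
-- Note: Python's `int(n / 10)` (float division) is ported as floor division, exact on Dom (|n| ≤ 2^31 < 2^53).

-- ===== PORT A =====
theorem pvFloordivTen_lt (n : Int) (h : 0 < n) :
    (PySem.Int.floordiv n 10).toNat < n.toNat := by
  rw [PySem.Int.floordiv_eq_ediv_of_pos (by omega)]
  omega

def aDigitsLoop (n : Int) (acc : List Int) : List Int :=
  if h : 0 < n then
    aDigitsLoop (PySem.Int.floordiv n 10)
      (if PySem.Int.mod n 10 ≠ 0 then acc ++ [PySem.Int.mod n 10] else acc)
  else acc
termination_by n.toNat
decreasing_by exact pvFloordivTen_lt n h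

def zerosLoop (n : Int) (zeros : Int) : Int :=
  if h : 0 < n then
    zerosLoop (PySem.Int.floordiv n 10)
      (if PySem.Int.mod n 10 = 0 then zeros + 1 else zeros)
  else zeros
termination_by n.toNat
decreasing_by exact pvFloordivTen_lt n h

def determinezeros (n : Int) : Int := zerosLoop n 0

def tenLoop (zeros : Int) (m : Int) : Int :=
  if h : 0 < zeros then tenLoop (zeros - 1) (m * 10) else m
termination_by zeros.toNat
decreasing_by omega

def detminnumber (n : Int) : Int :=
  let l := aDigitsLoop n []
  let ls := PySem.List.sorted l (fun x => x) false
  let m := (PySem.List.pyGet? ls 0).getD 0          -- none = IndexError (n ≤ 0), excluded by Pre_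
  let ls' := ((PySem.List.pop? ls 0).map (fun p => p.2)).getD []
  let zeros := determinezeros n
  let m := tenLoop zeros m
  (PySem.List.pyRange 0 (PySem.List.len ls') 1).foldl
    (fun m i => m * 10 + PySem.List.pyGetD ls' i 0) m

-- ===== PORT B =====
def bCountLoop (n : Int) (c : PySem.Dict Int Int) : PySem.Dict Int Int :=
  if h : 0 < n then
    bCountLoop (PySem.Int.floordiv n 10)
      (c.insert (PySem.Int.mod n 10) (c.getD (PySem.Int.mod n 10) 0 + 1))
  else c
termination_by n.toNat
decreasing_by exact pvFloordivTen_lt n h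

def detminnumber_alt (n : Int) : Int :=
  let c := bCountLoop n PySem.Dict.empty
  -- min over the generator; .getD 0 = ValueError on the empty generator (n ≤ 0), excluded by Pre_
  let lead := (PySem.List.min?
      ((PySem.List.pyRange 1 10 1).filter (fun d => decide (0 < c.getD d 0)))
      (fun d => d)).getD 0
  let m := (List.range (c.getD 0 0).toNat).foldl (fun m _ => m * 10) lead
  let c' := c.insert lead (c.getD lead 0 - 1)
  (PySem.List.pyRange 1 10 1).foldl
    (fun m d => (List.range (c'.getD d 0).toNat).foldl (fun m _ => m * 10 + d) m) m

-- ===== PRECONDITION & SPEC =====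
-- A raises IndexError (l[0] on the empty list) for n ≤ 0; B raises ValueError there too.
def Pre_detminnumber (n : Int) : Prop := 0 < n
instance (n : Int) : Decidable (Pre_detminnumber n) := by unfold Pre_detminnumber; infer_instance
def pvWitness_detminnumber : Int := 102

def Spec_detminnumber (n : Int) (out : Int) : Prop := out = detminnumber_alt n
instance (n : Int) (out : Int) : Decidable (Spec_detminnumber n out) := by unfold Spec_detminnumber; infer_instance

-- ===== CLAIM (what is proved, stated in full; the proofs are below) =====
def Claim_equal_detminnumber : Prop :=
  ∀ (n : Int), Dom_detminnumber n → Pre_detminnumber n → Spec_detminnumber n (detminnumber n)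

-- ===== LEMMAS AND PROOFS =====

-- all digits of n (low to high), proof-side characterisation of the three loops
def pvDigits (n : Int) : List Int :=
  if h : 0 < n then PySem.Int.mod n 10 :: pvDigits (PySem.Int.floordiv n 10) else []
termination_by n.toNat
decreasing_by exact pvFloordivTen_lt n h

theorem pvDigits_mem (n : Int) : ∀ x ∈ pvDigits n, 0 ≤ x ∧ x ≤ 9 := by
  fun_induction pvDigits n with
  | case1 n h ih =>
    intro x hx
    rcases List.mem_cons.mp hx with rfl | hx
    · rw [PySem.Int.mod_eq_emod_of_pos (by omega)]; omega
    · exact ih x hx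
  | case2 n h => intro x hx; simp at hx

theorem aDigitsLoop_eq (n : Int) (acc : List Int) :
    aDigitsLoop n acc = acc ++ (pvDigits n).filter (fun d => decide (d ≠ 0)) := by
  fun_induction pvDigits n generalizing acc with
  | case1 n h ih =>
    have hmod : PySem.Int.mod n 10 = n % 10 := PySem.Int.mod_eq_emod_of_pos (by omega)
    rw [aDigitsLoop, dif_pos h, ih, List.filter_cons, hmod]
    by_cases hm : n % 10 = 0
    · rw [if_neg (not_not_intro hm), if_neg (by simp; omega)]
    · rw [if_pos hm, if_pos (by simp; omega)]
      simp
  | case2 n h => rw [aDigitsLoop, dif_neg h]; simp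

theorem zerosLoop_eq (n : Int) (z : Int) :
    zerosLoop n z = z + ((pvDigits n).count 0 : Int) := by
  fun_induction pvDigits n generalizing z with
  | case1 n h ih =>
    have hmod : PySem.Int.mod n 10 = n % 10 := PySem.Int.mod_eq_emod_of_pos (by omega)
    rw [zerosLoop, dif_pos h, ih, List.count_cons, hmod]
    by_cases hm : n % 10 = 0
    · rw [if_pos hm, if_pos (by simp; omega)]
      push_cast; ring
    · rw [if_neg hm, if_neg (by simp; omega)]
      push_cast; ring
  | case2 n h => rw [zerosLoop, dif_neg h]; simp

theorem bCountLoop_eq (n : Int) (c : PySem.Dict Int Int) :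
    bCountLoop n c = (pvDigits n).foldl (fun d x => d.insert x (d.getD x 0 + 1)) c := by
  fun_induction pvDigits n generalizing c with
  | case1 n h ih => rw [bCountLoop, dif_pos h, ih]; rfl
  | case2 n h => rw [bCountLoop, dif_neg h]; simp

theorem tenLoop_eq (z : Int) (m : Int) : tenLoop z m = m * 10 ^ z.toNat := by
  fun_induction tenLoop z m with
  | case1 z m h ih =>
    rw [ih]
    have hz : z.toNat = (z - 1).toNat + 1 := by omega
    rw [hz]; ring
  | case2 z m h =>
    have hz : z.toNat = 0 := by omega
    rw [hz]; ring

theorem pvDigits_filter_ne_nil (n : Int) (h : 0 < n) :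
    (pvDigits n).filter (fun d => decide (d ≠ 0)) ≠ [] := by
  fun_induction pvDigits n with
  | case1 n h' ih =>
    have hmod : PySem.Int.mod n 10 = n % 10 := PySem.Int.mod_eq_emod_of_pos (by omega)
    have hdiv : PySem.Int.floordiv n 10 = n / 10 := PySem.Int.floordiv_eq_ediv_of_pos (by omega)
    rw [List.filter_cons, hmod]
    by_cases hm : n % 10 = 0
    · rw [if_neg (by simp; omega)]
      exact ih (by rw [hdiv]; omega)
    · rw [if_pos (by simp; omega)]
      simp
  | case2 n h' => omega

-- the nine nonzero digits expanded from a count table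
def expandNine (cnt : Int → Nat) : List Int :=
  ([1,2,3,4,5,6,7,8,9] : List Int).flatMap (fun d => List.replicate (cnt d) d)

theorem expandNine_sorted (cnt : Int → Nat) : (expandNine cnt).Pairwise (· ≤ ·) := by
  unfold expandNine
  simp only [List.flatMap_cons, List.flatMap_nil, List.append_nil]
  simp [List.pairwise_append, List.pairwise_replicate, List.mem_replicate]
  and_intros <;> (intro _ b hb; omega)

theorem expandNine_count (cnt : Int → Nat) (a : Int) :
    (expandNine cnt).count a = if 1 ≤ a ∧ a ≤ 9 then cnt a else 0 := by
  by_cases ha : 1 ≤ a ∧ a ≤ 9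
  · rw [if_pos ha]
    obtain ⟨ha1, ha9⟩ := ha
    interval_cases a <;> simp [expandNine, List.count_append, List.count_replicate]
  · rw [if_neg ha]
    simp [expandNine, List.count_append, List.count_replicate]
    omega

theorem expandNine_eq (L : List Int) (h9 : ∀ x ∈ L, 1 ≤ x ∧ x ≤ 9)
    (hs : L.Pairwise (· ≤ ·)) : expandNine (fun d => L.count d) = L := by
  have hperm : (expandNine (fun d => L.count d)).Perm L := by
    apply List.perm_iff_count.mpr
    intro a
    rw [expandNine_count]
    by_cases ha : 1 ≤ a ∧ a ≤ 9
    · rw [if_pos ha]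
    · rw [if_neg ha]
      symm
      exact List.count_eq_zero.mpr (fun hmem => ha (h9 a hmem))
  exact hperm.eq_of_pairwise (fun a b _ _ h1 h2 => le_antisymm h1 h2) (expandNine_sorted _) hs

theorem range_foldl_eq_replicate (k : Nat) (d m : Int) (f : Int → Int → Int) :
    (List.range k).foldl (fun m _ => f m d) m = (List.replicate k d).foldl f m := by
  induction k generalizing m with
  | zero => rfl
  | succ k ih =>
    rw [List.range_succ, List.replicate_succ', List.foldl_append, List.foldl_append]
    simp [ih]

theorem foldl_flatMap' (ds : List Int) (g : Int → List Int) (f : Int → Int → Int) (i : Int) :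
    (ds.flatMap g).foldl f i = ds.foldl (fun a d => (g d).foldl f a) i := by
  induction ds generalizing i with
  | nil => rfl
  | cons d ds ih => simp [List.foldl_append, ih]

theorem range_foldl_mul_ten (k : Nat) (m : Int) :
    (List.range k).foldl (fun m _ => m * 10) m = m * 10 ^ k := by
  induction k with
  | zero => simp
  | succ k ih => simp [List.range_succ, List.foldl_append, ih]; ring

theorem bCount_getD (n v : Int) :
    (bCountLoop n PySem.Dict.empty).getD v 0 = ((pvDigits n).count v : Int) := by
  rw [bCountLoop_eq, PySem.Dict.getD_foldl_insert_add_one]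
  simp [PySem.Dict.getD_empty]

theorem detminnumber_spec' (n : Int) (h : 0 < n) : detminnumber n = detminnumber_alt n := by
  have hL9 : ∀ x ∈ (pvDigits n).filter (fun d => decide (d ≠ 0)), 1 ≤ x ∧ x ≤ 9 := by
    intro x hx
    have hxD := List.mem_of_mem_filter hx
    have hb := pvDigits_mem n x hxD
    have hne : x ≠ 0 := by simpa using List.of_mem_filter hx
    omega
  obtain ⟨m0, t, hs⟩ : ∃ m0 t,
      PySem.List.sorted ((pvDigits n).filter (fun d => decide (d ≠ 0))) (fun x => x) false
        = m0 :: t := by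
    cases hsl : PySem.List.sorted ((pvDigits n).filter (fun d => decide (d ≠ 0))) (fun x => x) false with
    | nil => exact absurd ((PySem.List.sorted_eq_nil_iff _ _ _).mp hsl) (pvDigits_filter_ne_nil n h)
    | cons a l => exact ⟨a, l, rfl⟩
  have hperm : (m0 :: t).Perm ((pvDigits n).filter (fun d => decide (d ≠ 0))) := by
    rw [← hs]; exact PySem.List.sorted_perm _ _ _
  have hpair : (m0 :: t).Pairwise (· ≤ ·) := by
    have := PySem.List.sorted_pairwise
      (xs := (pvDigits n).filter (fun d => decide (d ≠ 0))) (key := fun x => x)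
    rw [hs] at this
    exact this
  have hmem9 : ∀ x ∈ m0 :: t, 1 ≤ x ∧ x ≤ 9 := fun x hx => hL9 x (hperm.mem_iff.mp hx)
  have hcnt : ∀ d : Int, d ≠ 0 → (pvDigits n).count d = (m0 :: t).count d := by
    intro d hd
    rw [hperm.count_eq, List.count_filter (by simpa using hd)]
  -- A's value
  have hA : detminnumber n =
      t.foldl (fun m d => m * 10 + d) (m0 * 10 ^ ((pvDigits n).count 0)) := by
    have e1 : aDigitsLoop n [] = (pvDigits n).filter (fun d => decide (d ≠ 0)) := by
      simpa using aDigitsLoop_eq n []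
    have e2 : PySem.List.pyGet? (m0 :: t) (0 : Int) = some m0 := by
      simp [PySem.List.pyGet?, PySem.List.pyIdx?]
    have e3 : determinezeros n = ((pvDigits n).count 0 : Int) := by
      simpa using zerosLoop_eq n 0
    simp only [detminnumber, e1, hs, e2, e3, PySem.List.pop?_zero_cons, Option.map_some,
      Option.getD_some]
    rw [tenLoop_eq]
    rw [PySem.List.foldl_pyRange_zero_pyGetD (xs := t) (d := 0) (f := fun a x => a * 10 + x)]
    simp
  -- B's count table
  have hget : ∀ v : Int, (bCountLoop n PySem.Dict.empty).getD v 0 = ((pvDigits n).count v : Int) :=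
    bCount_getD n
  -- B's lead = m0
  have hrange : PySem.List.pyRange 1 10 1 = ([1, 2, 3, 4, 5, 6, 7, 8, 9] : List Int) := by decide
  have hm0mem : m0 ∈ (PySem.List.pyRange 1 10 1).filter
      (fun d => decide (0 < (bCountLoop n PySem.Dict.empty).getD d 0)) := by
    have hb := hmem9 m0 (List.mem_cons_self)
    refine List.mem_filter.mpr ⟨?_, ?_⟩
    · rw [hrange]; simp; omega
    · rw [hget m0]
      have hc : 0 < (m0 :: t).count m0 := List.count_pos_iff.mpr List.mem_cons_self
      rw [hcnt m0 (by omega)]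
      simp only [decide_eq_true_eq]
      exact_mod_cast hc
  have hlow : ∀ e ∈ (PySem.List.pyRange 1 10 1).filter
      (fun d => decide (0 < (bCountLoop n PySem.Dict.empty).getD d 0)), m0 ≤ e := by
    intro e he
    obtain ⟨he1, he2⟩ := List.mem_filter.mp he
    rw [hrange] at he1
    have he9 : 1 ≤ e ∧ e ≤ 9 := by simp at he1; omega
    have hepos : 0 < (pvDigits n).count e := by
      have := of_decide_eq_true he2
      rw [hget e] at this
      omega
    have hemem : e ∈ m0 :: t := by
      rw [hcnt e (by omega)] at hepos
      exact List.count_pos_iff.mp hepos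
    rcases List.mem_cons.mp hemem with rfl | het
    · exact le_refl _
    · exact (List.pairwise_cons.mp hpair).1 e het
  have hlead : (PySem.List.min? ((PySem.List.pyRange 1 10 1).filter
      (fun d => decide (0 < (bCountLoop n PySem.Dict.empty).getD d 0))) (fun d => d)).getD 0
        = m0 := by
    cases hmq : PySem.List.min? ((PySem.List.pyRange 1 10 1).filter
        (fun d => decide (0 < (bCountLoop n PySem.Dict.empty).getD d 0))) (fun d => d) with
    | none =>
      exact absurd ((PySem.List.min?_eq_none_iff _ _).mp hmq) (List.ne_nil_of_mem hm0mem)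
    | some m =>
      have h1 := PySem.List.min?_mem hmq
      have h2 := PySem.List.min?_isMin hmq m0 hm0mem
      have : m = m0 := le_antisymm (by simpa using h2) (hlow m h1)
      simp [this]
  -- B's remaining counts are t's counts
  have htc : ∀ d : Int, 1 ≤ d → d ≤ 9 →
      (((bCountLoop n PySem.Dict.empty).insert m0
          ((bCountLoop n PySem.Dict.empty).getD m0 0 - 1)).getD d 0).toNat = t.count d := by
    intro d h1 h9
    rw [PySem.Dict.getD_insert]
    by_cases hd : d = m0
    · rw [if_pos hd, hget m0, hcnt m0 (by have := hmem9 m0 List.mem_cons_self; omega)]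
      subst hd
      rw [List.count_cons_self]
      omega
    · rw [if_neg hd, hget d, hcnt d (by omega), List.count_cons_of_ne (by exact fun hh => hd hh.symm)]
      omega
  -- t is sorted with digits 1..9, so it equals its nine-bucket expansion
  have ht9 : ∀ x ∈ t, 1 ≤ x ∧ x ≤ 9 := fun x hx => hmem9 x (List.mem_cons_of_mem _ hx)
  have htexp : expandNine (fun d => t.count d) = t :=
    expandNine_eq t ht9 (List.pairwise_cons.mp hpair).2
  -- assemble B
  have hB : detminnumber_alt n =
      t.foldl (fun m d => m * 10 + d) (m0 * 10 ^ ((pvDigits n).count 0)) := by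
    simp only [detminnumber_alt, hlead]
    rw [show ((bCountLoop n PySem.Dict.empty).getD 0 0).toNat = (pvDigits n).count 0 by
      rw [hget 0]; omega]
    rw [range_foldl_mul_ten]
    rw [hrange]
    have hcongr := PySem.List.foldl_congr_mem ([1, 2, 3, 4, 5, 6, 7, 8, 9] : List Int)
      (fun m d => (List.range
          ((((bCountLoop n PySem.Dict.empty).insert m0
              ((bCountLoop n PySem.Dict.empty).getD m0 0 - 1)).getD d 0).toNat)).foldl
        (fun m _ => m * 10 + d) m)
      (fun m d => (List.replicate (t.count d) d).foldl (fun m x => m * 10 + x) m)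
      (m0 * 10 ^ ((pvDigits n).count 0))
      (by
        intro acc x hx
        have hx9 : 1 ≤ x ∧ x ≤ 9 := by simp at hx; omega
        simp only
        rw [range_foldl_eq_replicate (f := fun m x => m * 10 + x), htc x hx9.1 hx9.2])
    rw [hcongr]
    rw [show ([1, 2, 3, 4, 5, 6, 7, 8, 9] : List Int).foldl (fun a d =>
          (List.replicate (t.count d) d).foldl (fun m x => m * 10 + x) a)
          (m0 * 10 ^ ((pvDigits n).count 0))
        = (expandNine (fun d => t.count d)).foldl (fun m x => m * 10 + x)
          (m0 * 10 ^ ((pvDigits n).count 0)) from (foldl_flatMap' _ _ _ _).symm]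
    rw [htexp]
  rw [hA, hB]

-- ===== VERDICT (by name: the statement is the Claim_ definition above) =====
theorem detminnumber_spec : Claim_equal_detminnumber := by
  intro n _ hpre
  unfold Spec_detminnumber
  exact detminnumber_spec' n hpre
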